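-- pv_equiv track=rewrite | github.com/Vega-Luis/deduction-game | exhaustivo.py | comprobarSol
-- ===== SOURCE A (Python) =====
-- def comprobarSol(res, sol):
--     result1=False
--     result2=True
--     for i in range(len(res)):
--         for j in range(len(res[i])):
--             if res[i][j] in sol:
--                 result1=True
--             else:
--                 result2=False
--         if result1==True and result2==True:
--             return True
--     return False
-- ===== SOURCE B (Python) =====
-- def comprobarSol(res, sol):
--     # Only the first non-empty row decides (A's booleans never reset).
--     for row in res:
--         if row:
--             return all(x in sol for x in row)
--     return False
-- ===== Notes on version B (the rewrite author's own statement) =====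
-- stated objective: simpler
-- what changed: Replaced A's cross-row two-boolean state machine that scans every element of every row by a direct short-circuit: only the first non-empty row can decide the result, so B returns all(x in sol for x in row) for that row and never visits later rows.
import Mathlib
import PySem

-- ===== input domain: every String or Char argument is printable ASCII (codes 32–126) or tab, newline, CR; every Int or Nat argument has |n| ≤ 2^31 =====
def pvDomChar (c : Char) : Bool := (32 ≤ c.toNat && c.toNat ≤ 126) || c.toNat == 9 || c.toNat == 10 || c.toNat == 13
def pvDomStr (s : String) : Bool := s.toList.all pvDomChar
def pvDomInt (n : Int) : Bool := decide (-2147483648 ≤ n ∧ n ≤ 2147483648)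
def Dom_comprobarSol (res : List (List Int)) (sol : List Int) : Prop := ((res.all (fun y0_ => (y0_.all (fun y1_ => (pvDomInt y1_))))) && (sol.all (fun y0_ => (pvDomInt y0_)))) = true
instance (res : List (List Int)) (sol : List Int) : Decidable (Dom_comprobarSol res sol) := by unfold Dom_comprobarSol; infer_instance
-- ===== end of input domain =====

-- B: since A's booleans never reset, only the first non-empty row decides; B returns
-- all-in-sol for that row directly (objective: simpler).

-- ===== PORT A =====
-- inner for-loop over row, threading (result1, result2)
def comprobarSolInner (sol : List Int) (row : List Int) (st : Bool × Bool) : Bool × Bool :=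
  row.foldl (fun s x => if x ∈ sol then (true, s.2) else (s.1, false)) st

-- outer for-loop with early return
def comprobarSolLoop (res : List (List Int)) (sol : List Int) (r1 r2 : Bool) : Bool :=
  match res with
  | [] => false
  | row :: rest =>
    let s := comprobarSolInner sol row (r1, r2)
    if s.1 && s.2 then true else comprobarSolLoop rest sol s.1 s.2

def comprobarSol (res : List (List Int)) (sol : List Int) : Bool :=
  comprobarSolLoop res sol false true

-- ===== PORT B =====
def comprobarSol_alt (res : List (List Int)) (sol : List Int) : Bool :=
  match res with
  | [] => false
  | row :: rest =>
    match row with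
    | [] => comprobarSol_alt rest sol
    | _ :: _ => row.all (fun x => decide (x ∈ sol))

-- ===== PRECONDITION & SPEC =====
def Spec_comprobarSol (res : List (List Int)) (sol : List Int) (out : Bool) : Prop := out = comprobarSol_alt res sol
instance (res : List (List Int)) (sol : List Int) (out : Bool) : Decidable (Spec_comprobarSol res sol out) := by unfold Spec_comprobarSol; infer_instance

-- ===== CLAIM (what is proved, stated in full; the proofs are below) =====
def Claim_equal_comprobarSol : Prop := ∀ (res : List (List Int)) (sol : List Int), Dom_comprobarSol res sol → Spec_comprobarSol res sol (comprobarSol res sol)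

-- ===== LEMMAS AND PROOFS =====

theorem inner_snd (sol row : List Int) (r1 r2 : Bool) :
    (comprobarSolInner sol row (r1, r2)).2 = (r2 && row.all (fun x => decide (x ∈ sol))) := by
  induction row generalizing r1 r2 with
  | nil => simp [comprobarSolInner]
  | cons y ys ih =>
    simp only [comprobarSolInner, List.foldl_cons] at *
    by_cases h : y ∈ sol <;> simp [h, ih, Bool.and_assoc, Bool.and_comm]

theorem inner_fst (sol row : List Int) (r1 r2 : Bool) :
    (comprobarSolInner sol row (r1, r2)).1 = (r1 || row.any (fun x => decide (x ∈ sol))) := by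
  induction row generalizing r1 r2 with
  | nil => simp [comprobarSolInner]
  | cons y ys ih =>
    simp only [comprobarSolInner, List.foldl_cons] at *
    by_cases h : y ∈ sol <;> simp [h, ih]

-- once result2 is false, the loop can never return True
theorem loop_dead (res : List (List Int)) (sol : List Int) (r1 : Bool) :
    comprobarSolLoop res sol r1 false = false := by
  induction res generalizing r1 with
  | nil => rfl
  | cons row rest ih =>
    simp only [comprobarSolLoop]
    have h2 := inner_snd sol row r1 false
    simp only [Bool.false_and] at h2
    rcases hs : comprobarSolInner sol row (r1, false) with ⟨a, b⟩
    rw [hs] at h2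
    simp at h2
    subst h2
    simp [ih]

theorem loop_eq (res : List (List Int)) (sol : List Int) :
    comprobarSolLoop res sol false true = comprobarSol_alt res sol := by
  induction res with
  | nil => rfl
  | cons row rest ih =>
    cases row with
    | nil =>
      simp only [comprobarSolLoop, comprobarSolInner, List.foldl_nil, comprobarSol_alt]
      simpa using ih
    | cons y ys =>
      simp only [comprobarSolLoop, comprobarSol_alt]
      have hf := inner_fst sol (y :: ys) false true
      have hs := inner_snd sol (y :: ys) false true
      rcases hw : comprobarSolInner sol (y :: ys) (false, true) with ⟨a, b⟩
      rw [hw] at hf hs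
      simp only at hf hs
      subst hf; subst hs
      by_cases hall : (y :: ys).all (fun x => decide (x ∈ sol))
      · have hany : (y :: ys).any (fun x => decide (x ∈ sol)) = true := by
          simp only [List.all_cons, Bool.and_eq_true] at hall
          simp [List.any_cons, hall.1]
        simp [hall, hany]
      · simp only [Bool.not_eq_true] at hall
        simp [hall, loop_dead]

-- ===== VERDICT (by name: the statement is the Claim_ definition above) =====
theorem comprobarSol_spec : Claim_equal_comprobarSol := by
  intro res sol _
  unfold Spec_comprobarSol comprobarSol
  exact loop_eq res sol
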